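-- pv_equiv track=rewrite | github.com/buildout/buildout | src/zc/buildout/buildout.py | _format_picked_versions
-- ===== SOURCE A (Python) =====
-- def _format_picked_versions(picked_versions, required_by):
--     output = ['[versions]']
--     required_output = []
--     for dist_, version in picked_versions:
--         if dist_ in required_by:
--             required_output.append('')
--             required_output.append('# Required by:')
--             for req_ in sorted(required_by[dist_]):
--                 required_output.append('# '+req_)
--             target = required_output
--         else:
--             target = output
--         target.append("%s = %s" % (dist_, version))
--     output.extend(required_output)
--     return output
-- ===== SOURCE B (Python) =====
-- def _format_picked_versions(picked_versions, required_by):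
--     # Two separate passes instead of A's one pass with a target-pointer:
--     # plain version lines first, then the '# Required by:' blocks.
--     output = ['[versions]']
--     output.extend('%s = %s' % (d, v)
--                   for d, v in picked_versions if d not in required_by)
--     for d, v in picked_versions:
--         if d in required_by:
--             output.append('')
--             output.append('# Required by:')
--             for r in sorted(required_by[d]):
--                 output.append('# ' + r)
--             output.append('%s = %s' % (d, v))
--     return output
-- ===== Notes on version B (the rewrite author's own statement) =====
-- stated objective: simpler
-- what changed: Replaced the one-pass loop that routes each line through a mutable target pointer into two side lists with two plain passes over picked_versions: a comprehension for the non-required version lines, then a loop appending the '# Required by:' blocks.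
import Mathlib
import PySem

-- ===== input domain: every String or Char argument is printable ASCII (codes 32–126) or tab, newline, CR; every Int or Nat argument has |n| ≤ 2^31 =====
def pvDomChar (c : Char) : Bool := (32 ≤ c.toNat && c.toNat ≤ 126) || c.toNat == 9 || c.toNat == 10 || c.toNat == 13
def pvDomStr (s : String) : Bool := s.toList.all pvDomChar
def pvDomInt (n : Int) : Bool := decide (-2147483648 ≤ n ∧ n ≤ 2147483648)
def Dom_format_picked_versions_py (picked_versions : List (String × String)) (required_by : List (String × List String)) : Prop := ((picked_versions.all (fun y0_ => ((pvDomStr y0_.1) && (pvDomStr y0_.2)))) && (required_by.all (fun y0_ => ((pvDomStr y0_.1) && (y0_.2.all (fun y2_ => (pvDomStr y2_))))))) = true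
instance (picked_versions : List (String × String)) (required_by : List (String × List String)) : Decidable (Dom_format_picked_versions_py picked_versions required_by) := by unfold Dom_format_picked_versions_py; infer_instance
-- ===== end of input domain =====

-- B changes only the decomposition (two plain passes instead of one pass routed through a
-- mutable target pointer); same cost, same output.

-- ===== PORT A =====
-- dict lookup on the association list: first match (the dict convention for required_by)
def pvLookup (rb : List (String × List String)) (k : String) : Option (List String) :=
  (rb.find? (fun p => p.1 == k)).map (·.2)

-- one pass; state = (output, required_output); 'target' is which component receives the line
def format_picked_versions_py (picked_versions : List (String × String)) (required_by : List (String × List String)) : List String :=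
  let st := picked_versions.foldl
    (fun (st : List String × List String) dv =>
      match pvLookup required_by dv.1 with
      | some reqs =>
          let req := st.2 ++ ["", "# Required by:"] ++
            (PySem.List.sorted reqs (fun x => x) false).map (fun r => "# " ++ r)
          (st.1, req ++ [dv.1 ++ " = " ++ dv.2])
      | none => (st.1 ++ [dv.1 ++ " = " ++ dv.2], st.2))
    (["[versions]"], [])
  st.1 ++ st.2

-- ===== PORT B =====
-- pass 1: comprehension of the non-required version lines; pass 2: append the required blocks
def format_picked_versions_py_alt (picked_versions : List (String × String)) (required_by : List (String × List String)) : List String :=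
  let output := "[versions]" ::
    (picked_versions.filter (fun dv => (pvLookup required_by dv.1).isNone)).map
      (fun dv => dv.1 ++ " = " ++ dv.2)
  picked_versions.foldl
    (fun acc dv =>
      match pvLookup required_by dv.1 with
      | some reqs =>
          acc ++ ["", "# Required by:"] ++
            (PySem.List.sorted reqs (fun x => x) false).map (fun r => "# " ++ r) ++
            [dv.1 ++ " = " ++ dv.2]
      | none => acc)
    output

-- ===== PRECONDITION & SPEC =====
def Spec_format_picked_versions_py (picked_versions : List (String × String)) (required_by : List (String × List String)) (out : List String) : Prop := out = format_picked_versions_py_alt picked_versions required_by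
instance (picked_versions : List (String × String)) (required_by : List (String × List String)) (out : List String) : Decidable (Spec_format_picked_versions_py picked_versions required_by out) := by unfold Spec_format_picked_versions_py; infer_instance

-- ===== CLAIM (what is proved, stated in full; the proofs are below) =====
def Claim_equal_format_picked_versions_py : Prop := ∀ (picked_versions : List (String × String)) (required_by : List (String × List String)), Dom_format_picked_versions_py picked_versions required_by → Spec_format_picked_versions_py picked_versions required_by (format_picked_versions_py picked_versions required_by)

-- ===== LEMMAS AND PROOFS =====

-- the '# Required by:' block contributed by one (dist, version) pair ([] if not required)
def pvBlock (rb : List (String × List String)) (dv : String × String) : List String :=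
  match pvLookup rb dv.1 with
  | some reqs =>
      ["", "# Required by:"] ++
        (PySem.List.sorted reqs (fun x => x) false).map (fun r => "# " ++ r) ++
        [dv.1 ++ " = " ++ dv.2]
  | none => []

theorem loopA (rb : List (String × List String)) :
    ∀ (pv : List (String × String)) (out req : List String),
      pv.foldl
        (fun (st : List String × List String) dv =>
          match pvLookup rb dv.1 with
          | some reqs =>
              let r := st.2 ++ ["", "# Required by:"] ++
                (PySem.List.sorted reqs (fun x => x) false).map (fun r => "# " ++ r)
              (st.1, r ++ [dv.1 ++ " = " ++ dv.2])
          | none => (st.1 ++ [dv.1 ++ " = " ++ dv.2], st.2))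
        (out, req)
      = (out ++ (pv.filter (fun dv => (pvLookup rb dv.1).isNone)).map
            (fun dv => dv.1 ++ " = " ++ dv.2),
         req ++ pv.flatMap (pvBlock rb)) := by
  intro pv
  induction pv with
  | nil => intro out req; simp
  | cons dv rest ih =>
      intro out req
      cases h : pvLookup rb dv.1 with
      | some reqs =>
          simp only [List.foldl_cons, List.flatMap_cons, List.filter_cons, pvBlock, h,
            Option.isNone_some]
          rw [ih]
          simp
      | none =>
          simp only [List.foldl_cons, List.flatMap_cons, List.filter_cons, pvBlock, h,
            Option.isNone_none]
          rw [ih]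
          simp

theorem loopB (rb : List (String × List String)) :
    ∀ (pv : List (String × String)) (acc : List String),
      pv.foldl
        (fun acc dv =>
          match pvLookup rb dv.1 with
          | some reqs =>
              acc ++ ["", "# Required by:"] ++
                (PySem.List.sorted reqs (fun x => x) false).map (fun r => "# " ++ r) ++
                [dv.1 ++ " = " ++ dv.2]
          | none => acc)
        acc
      = acc ++ pv.flatMap (pvBlock rb) := by
  intro pv
  induction pv with
  | nil => intro acc; simp
  | cons dv rest ih =>
      intro acc
      cases h : pvLookup rb dv.1 with
      | some reqs =>
          simp only [List.foldl_cons, List.flatMap_cons, pvBlock, h]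
          rw [ih]; simp
      | none =>
          simp only [List.foldl_cons, List.flatMap_cons, pvBlock, h]
          rw [ih]; simp

-- ===== VERDICT (by name: the statement is the Claim_ definition above) =====
theorem format_picked_versions_py_spec : Claim_equal_format_picked_versions_py := by
  intro pv rb _
  unfold Spec_format_picked_versions_py format_picked_versions_py format_picked_versions_py_alt
  rw [loopA rb pv, loopB rb pv]
  simp
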